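-- pv_equiv track=rewrite | github.com/SLACKHA/pyJac | cache_optimizer.py | gather_stats
-- ===== SOURCE A (Python) =====
-- def gather_stats(the_list):
--     loads = 0
--     stores = 0
--     for i, c_list in enumerate(the_list):
--         for entry in c_list[0]:
--             if (i > 0 and entry not in the_list[i - 1][0]) or i == 0:
--                 loads += 1
--             if ((i < len(the_list) - 1 and entry not in the_list[i + 1][0])
--                                     or i == len(the_list) - 1):
--                 stores += 1
--         for entry in c_list[1]:
--             if (i > 0 and entry not in the_list[i - 1][1]) or i == 0:
--                 loads += 1
--             if ((i < len(the_list) - 1 and entry not in the_list[i + 1][1])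
--                                     or i == len(the_list) - 1):
--                 stores += 1
--
--     return loads, stores
-- ===== SOURCE B (Python) =====
-- def gather_stats(the_list):
--     n = len(the_list)
--     loads = 0
--     stores = 0
--     for i, frame in enumerate(the_list):
--         for k in (0, 1):
--             cur = frame[k]
--             # frequency table of the current sublist, built once
--             freq = {}
--             for e in cur:
--                 freq[e] = freq.get(e, 0) + 1
--             if i == 0:
--                 loads += len(cur)
--             else:
--                 prev = set(the_list[i - 1][k])
--                 loads += len(cur) - sum(c for v, c in freq.items() if v in prev)
--             if i == n - 1:
--                 stores += len(cur)
--             else: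
--                 nxt = set(the_list[i + 1][k])
--                 stores += len(cur) - sum(c for v, c in freq.items() if v in nxt)
--     return loads, stores
-- ===== Notes on version B (the rewrite author's own statement) =====
-- stated objective: alternative
-- what changed: Replaces A's per-entry neighbour membership scans by complement counting: B builds a frequency dict of each sublist once and a set of the neighbour sublist, and computes each contribution as len(cur) minus the summed multiplicities of values present in the neighbour set (|A| - |A inter B| with multiplicity), with explicit i==0 / i==n-1 boundary branches instead of per-entry boundary tests.
import Mathlib
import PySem

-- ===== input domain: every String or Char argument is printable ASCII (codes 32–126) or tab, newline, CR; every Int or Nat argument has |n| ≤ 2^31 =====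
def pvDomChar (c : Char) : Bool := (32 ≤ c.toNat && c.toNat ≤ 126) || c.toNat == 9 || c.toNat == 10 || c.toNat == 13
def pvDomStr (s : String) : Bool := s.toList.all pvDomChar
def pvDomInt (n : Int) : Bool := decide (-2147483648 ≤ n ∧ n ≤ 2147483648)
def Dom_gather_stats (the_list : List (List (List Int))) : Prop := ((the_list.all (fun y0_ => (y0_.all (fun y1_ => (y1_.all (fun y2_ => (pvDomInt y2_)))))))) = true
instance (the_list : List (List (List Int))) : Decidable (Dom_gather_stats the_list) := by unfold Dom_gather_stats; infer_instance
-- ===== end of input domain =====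

-- B counts by complement — len(cur) minus the summed multiplicities (from a per-sublist
-- frequency dict) of values present in the neighbour's set — instead of A's per-entry
-- membership scans with per-entry boundary tests (alternative counting algorithm).

-- ===== PORT A =====
-- Literal port of A: enumerate loop with absolute-index neighbour lookups.
-- The i-1 / i+1 accesses are guarded in range by the conditions; the [] defaults of pyGetD on
-- c_list[0] / c_list[1] are unreachable under Pre_gather_stats (Python raises IndexError there).
def gather_stats (the_list : List (List (List Int))) : List Int :=
  let n : Int := the_list.length
  let r :=
    (PySem.List.enumerate the_list 0).foldl (fun (acc : Int × Int) ic =>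
      let i := ic.1
      let c := ic.2
      let acc :=
        (PySem.List.pyGetD c 0 []).foldl (fun (a : Int × Int) e =>
          let a := if (decide (0 < i) && !decide (e ∈ PySem.List.pyGetD (PySem.List.pyGetD the_list (i - 1) []) 0 [])) || decide (i = 0) then (a.1 + 1, a.2) else a
          if (decide (i < n - 1) && !decide (e ∈ PySem.List.pyGetD (PySem.List.pyGetD the_list (i + 1) []) 0 [])) || decide (i = n - 1) then (a.1, a.2 + 1) else a) acc
      (PySem.List.pyGetD c 1 []).foldl (fun (a : Int × Int) e =>
          let a := if (decide (0 < i) && !decide (e ∈ PySem.List.pyGetD (PySem.List.pyGetD the_list (i - 1) []) 1 [])) || decide (i = 0) then (a.1 + 1, a.2) else a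
          if (decide (i < n - 1) && !decide (e ∈ PySem.List.pyGetD (PySem.List.pyGetD the_list (i + 1) []) 1 [])) || decide (i = n - 1) then (a.1, a.2 + 1) else a) acc)
      ((0 : Int), (0 : Int))
  [r.1, r.2]

-- ===== PORT B =====
-- Literal port of Source B: for each window and each k in (0, 1), build the frequency
-- dict of cur ('for e in cur: freq[e] = freq.get(e, 0) + 1'), then add len(cur) at the boundary,
-- else len(cur) minus the sum of multiplicities of values in the neighbour's set.
-- 'sum(c for v, c in freq.items() if v in prev)' is the foldl over freq.items with the guard;
-- set(...) is PySem.Set.ofList (consumed only by membership tests, so hash order is irrelevant).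
def gather_stats_alt (the_list : List (List (List Int))) : List Int :=
  let n : Int := the_list.length
  let r :=
    (PySem.List.enumerate the_list 0).foldl (fun (acc : Int × Int) ifr =>
      let i := ifr.1
      let frame := ifr.2
      [(0 : Int), 1].foldl (fun (a : Int × Int) k =>
        let cur := PySem.List.pyGetD frame k []
        let freq := cur.foldl (fun (d : PySem.Dict Int Int) e => d.insert e (d.getD e 0 + 1)) PySem.Dict.empty
        let a :=
          if i = 0 then (a.1 + (cur.length : Int), a.2)
          else
            let prev := PySem.Set.ofList (PySem.List.pyGetD (PySem.List.pyGetD the_list (i - 1) []) k [])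
            (a.1 + ((cur.length : Int) - freq.items.foldl (fun (s : Int) vc => if PySem.Set.contains prev vc.1 then s + vc.2 else s) 0), a.2)
        if i = n - 1 then (a.1, a.2 + (cur.length : Int))
        else
          let nxt := PySem.Set.ofList (PySem.List.pyGetD (PySem.List.pyGetD the_list (i + 1) []) k [])
          (a.1, a.2 + ((cur.length : Int) - freq.items.foldl (fun (s : Int) vc => if PySem.Set.contains nxt vc.1 then s + vc.2 else s) 0))) acc)
      ((0 : Int), (0 : Int))
  [r.1, r.2]

-- ===== PRECONDITION & SPEC =====
-- Pre_ excludes exactly the inputs on which Python A raises IndexError: some window with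
-- fewer than two sublists (A evaluates c_list[0] and c_list[1] for every window).
def Pre_gather_stats (the_list : List (List (List Int))) : Prop :=
  ∀ c ∈ the_list, 2 ≤ c.length
instance (the_list : List (List (List Int))) : Decidable (Pre_gather_stats the_list) := by
  unfold Pre_gather_stats; infer_instance

def pvWitness_gather_stats : List (List (List Int)) := [[[1], [2]], [[1, 3], [2]]]

def Spec_gather_stats (the_list : List (List (List Int))) (out : List Int) : Prop := out = gather_stats_alt the_list
instance (the_list : List (List (List Int))) (out : List Int) : Decidable (Spec_gather_stats the_list out) := by unfold Spec_gather_stats; infer_instance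

-- ===== CLAIM (what is proved, stated in full; the proofs are below) =====
def Claim_equal_gather_stats : Prop := ∀ (the_list : List (List (List Int))), Dom_gather_stats the_list → Pre_gather_stats the_list → Spec_gather_stats the_list (gather_stats the_list)

-- ===== LEMMAS AND PROOFS =====

-- proof-side abbreviations -------------------------------------------------

-- total entry count of one window (both sublists)
def pvTlen (c : List (List Int)) : Int :=
  ((PySem.List.pyGetD c 0 []).length : Int) + ((PySem.List.pyGetD c 1 []).length : Int)

-- entries of c's sublists missing from d's matching sublists
def pvCnt2 (c d : List (List Int)) : Int :=
  ((PySem.List.pyGetD c 0 []).countP (fun e => !decide (e ∈ PySem.List.pyGetD d 0 [])) : Int)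
  + ((PySem.List.pyGetD c 1 []).countP (fun e => !decide (e ∈ PySem.List.pyGetD d 1 [])) : Int)

-- the per-index load / store contributions, in closed form
def pvLoadT (L : List (List (List Int))) (k : Nat) : Int :=
  if k = 0 then pvTlen (L.getD 0 []) else pvCnt2 (L.getD k []) (L.getD (k - 1) [])

def pvStoreT (L : List (List (List Int))) (k : Nat) : Int :=
  if k = L.length - 1 then pvTlen (L.getD k []) else pvCnt2 (L.getD k []) (L.getD (k + 1) [])

-- A's outer loop body, verbatim (so that pvA_unfold is rfl)
def pvStepA (the_list : List (List (List Int))) (n : Int) (acc : Int × Int)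
    (ic : Int × List (List Int)) : Int × Int :=
  let i := ic.1
  let c := ic.2
  let acc :=
    (PySem.List.pyGetD c 0 []).foldl (fun (a : Int × Int) e =>
      let a := if (decide (0 < i) && !decide (e ∈ PySem.List.pyGetD (PySem.List.pyGetD the_list (i - 1) []) 0 [])) || decide (i = 0) then (a.1 + 1, a.2) else a
      if (decide (i < n - 1) && !decide (e ∈ PySem.List.pyGetD (PySem.List.pyGetD the_list (i + 1) []) 0 [])) || decide (i = n - 1) then (a.1, a.2 + 1) else a) acc
  (PySem.List.pyGetD c 1 []).foldl (fun (a : Int × Int) e =>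
      let a := if (decide (0 < i) && !decide (e ∈ PySem.List.pyGetD (PySem.List.pyGetD the_list (i - 1) []) 1 [])) || decide (i = 0) then (a.1 + 1, a.2) else a
      if (decide (i < n - 1) && !decide (e ∈ PySem.List.pyGetD (PySem.List.pyGetD the_list (i + 1) []) 1 [])) || decide (i = n - 1) then (a.1, a.2 + 1) else a) acc

def pvFL (L : List (List (List Int))) (ic : Int × List (List Int)) : Int :=
  ((PySem.List.pyGetD ic.2 0 []).countP (fun e => (decide (0 < ic.1) && !decide (e ∈ PySem.List.pyGetD (PySem.List.pyGetD L (ic.1 - 1) []) 0 [])) || decide (ic.1 = 0)) : Int)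
  + ((PySem.List.pyGetD ic.2 1 []).countP (fun e => (decide (0 < ic.1) && !decide (e ∈ PySem.List.pyGetD (PySem.List.pyGetD L (ic.1 - 1) []) 1 [])) || decide (ic.1 = 0)) : Int)

def pvFS (L : List (List (List Int))) (n : Int) (ic : Int × List (List Int)) : Int :=
  ((PySem.List.pyGetD ic.2 0 []).countP (fun e => (decide (ic.1 < n - 1) && !decide (e ∈ PySem.List.pyGetD (PySem.List.pyGetD L (ic.1 + 1) []) 0 [])) || decide (ic.1 = n - 1)) : Int)
  + ((PySem.List.pyGetD ic.2 1 []).countP (fun e => (decide (ic.1 < n - 1) && !decide (e ∈ PySem.List.pyGetD (PySem.List.pyGetD L (ic.1 + 1) []) 1 [])) || decide (ic.1 = n - 1)) : Int)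

theorem pvA_unfold (L : List (List (List Int))) :
    gather_stats L =
      (let r := (PySem.List.enumerate L 0).foldl (pvStepA L (L.length : Int)) ((0 : Int), (0 : Int))
       [r.1, r.2]) := rfl

-- one conditional-count loop over a pair accumulator
theorem pvFoldCnt {α : Type} (p q : α → Bool) (l : List α) (s : Int × Int) :
    l.foldl (fun (a : Int × Int) e =>
        let a := if p e then (a.1 + 1, a.2) else a
        if q e then (a.1, a.2 + 1) else a) s
      = (s.1 + (l.countP p : Int), s.2 + (l.countP q : Int)) := by
  induction l generalizing s with
  | nil => simp
  | cons x xs ih =>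
    rw [List.foldl_cons, ih]
    by_cases hp : p x <;> by_cases hq : q x <;>
      simp [hp, hq, Prod.ext_iff] <;> omega

-- a loop adding two projections is two mapped sums
theorem pvFoldPair {α : Type} (f g : α → Int) (l : List α) (s : Int × Int) :
    l.foldl (fun (a : Int × Int) e => (a.1 + f e, a.2 + g e)) s
      = (s.1 + (l.map f).sum, s.2 + (l.map g).sum) := by
  induction l generalizing s with
  | nil => simp
  | cons x xs ih =>
    rw [List.foldl_cons, ih]
    simp [List.map_cons, List.sum_cons, add_assoc]

theorem pvStepA_eq (L : List (List (List Int))) (n : Int) :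
    pvStepA L n = fun acc ic => (acc.1 + pvFL L ic, acc.2 + pvFS L n ic) := by
  funext acc ic
  unfold pvStepA pvFL pvFS
  rw [pvFoldCnt, pvFoldCnt]
  dsimp only
  simp only [Prod.mk.injEq]
  exact ⟨by ring, by ring⟩

theorem pvFL_eval (L : List (List (List Int))) (k : Nat) :
    pvFL L ((k : Int), PySem.List.pyGetD L (k : Int) []) = pvLoadT L k := by
  unfold pvFL pvLoadT pvTlen pvCnt2
  cases k with
  | zero => simp [List.countP_true, PySem.List.pyGetD_zero, List.getD]
  | succ m =>
    have hidx : ((m + 1 : Nat) : Int) - 1 = ((m : Nat) : Int) := by push_cast; ring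
    have hd1 : decide ((0 : Int) < ((m + 1 : Nat) : Int)) = true :=
      decide_eq_true (by omega)
    have hd2 : decide ((((m + 1 : Nat) : Int)) = 0) = false :=
      decide_eq_false (by omega)
    simp only [hidx, PySem.List.pyGetD_natCast, hd1, hd2, Bool.true_and, Bool.or_false]
    rw [if_neg (Nat.succ_ne_zero m)]
    simp only [Nat.add_sub_cancel]

theorem pvFS_eval (L : List (List (List Int))) (k : Nat) (hk : k < L.length) :
    pvFS L (L.length : Int) ((k : Int), PySem.List.pyGetD L (k : Int) []) = pvStoreT L k := by
  unfold pvFS pvStoreT pvTlen pvCnt2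
  by_cases hk1 : k = L.length - 1
  · subst hk1
    have hc : ((L.length - 1 : Nat) : Int) = (L.length : Int) - 1 := by omega
    have hd1 : decide (((L.length - 1 : Nat) : Int) < (L.length : Int) - 1) = false := by simp [hc]
    have hd2 : decide ((((L.length - 1 : Nat) : Int)) = (L.length : Int) - 1) = true := by simp [hc]
    simp only [hd1, hd2, Bool.false_and, Bool.false_or, List.countP_true,
      PySem.List.pyGetD_natCast]
    simp
  · have hk2 : (k : Int) < (L.length : Int) - 1 := by omega
    have hne : (k : Int) ≠ (L.length : Int) - 1 := by omega
    have hd1 : decide ((k : Int) < (L.length : Int) - 1) = true := decide_eq_true hk2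
    have hd2 : decide ((k : Int) = (L.length : Int) - 1) = false := decide_eq_false hne
    have hidx : (k : Int) + 1 = ((k + 1 : Nat) : Int) := by push_cast; ring
    simp only [hd1, hd2, Bool.true_and, Bool.or_false, hidx, PySem.List.pyGetD_natCast]
    rw [if_neg hk1]

theorem pvA_char (L : List (List (List Int))) :
    gather_stats L = [((List.range L.length).map (pvLoadT L)).sum,
                      ((List.range L.length).map (pvStoreT L)).sum] := by
  rw [pvA_unfold]
  dsimp only
  rw [pvStepA_eq, pvFoldPair]
  rw [PySem.List.enumerate_eq_map_pyRange (d := [])]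
  rw [List.map_map, List.map_map]
  simp only [PySem.List.len_eq]
  rw [PySem.List.pyRange_one]
  rw [List.map_map, List.map_map]
  simp only [Function.comp_def, Int.sub_zero, Int.toNat_natCast, zero_add]
  congr 1
  · exact congrArg List.sum (List.map_congr_left fun k _ => pvFL_eval L k)
  · congr 1
    exact congrArg List.sum
      (List.map_congr_left fun k hk => pvFS_eval L k (List.mem_range.mp hk))

-- ----- B side ---------------------------------------------------------------

-- B's outer loop body, verbatim (so that pvB_unfold is rfl)
def pvStepB (the_list : List (List (List Int))) (n : Int) (acc : Int × Int)
    (ifr : Int × List (List Int)) : Int × Int :=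
  let i := ifr.1
  let frame := ifr.2
  [(0 : Int), 1].foldl (fun (a : Int × Int) k =>
    let cur := PySem.List.pyGetD frame k []
    let freq := cur.foldl (fun (d : PySem.Dict Int Int) e => d.insert e (d.getD e 0 + 1)) PySem.Dict.empty
    let a :=
      if i = 0 then (a.1 + (cur.length : Int), a.2)
      else
        let prev := PySem.Set.ofList (PySem.List.pyGetD (PySem.List.pyGetD the_list (i - 1) []) k [])
        (a.1 + ((cur.length : Int) - freq.items.foldl (fun (s : Int) vc => if PySem.Set.contains prev vc.1 then s + vc.2 else s) 0), a.2)
    if i = n - 1 then (a.1, a.2 + (cur.length : Int))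
    else
      let nxt := PySem.Set.ofList (PySem.List.pyGetD (PySem.List.pyGetD the_list (i + 1) []) k [])
      (a.1, a.2 + ((cur.length : Int) - freq.items.foldl (fun (s : Int) vc => if PySem.Set.contains nxt vc.1 then s + vc.2 else s) 0))) acc

theorem pvB_unfold (L : List (List (List Int))) :
    gather_stats_alt L =
      (let r := (PySem.List.enumerate L 0).foldl (pvStepB L (L.length : Int)) ((0 : Int), (0 : Int))
       [r.1, r.2]) := rfl

-- a guarded accumulating sum is a mapped sum
theorem pvFoldIfAdd {α : Type} (q : α → Bool) (f : α → Int) (l : List α) (a : Int) :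
    l.foldl (fun (s : Int) vc => if q vc then s + f vc else s) a
      = a + (l.map (fun vc => if q vc then f vc else 0)).sum := by
  induction l generalizing a with
  | nil => simp
  | cons x xs ih =>
    rw [List.foldl_cons, ih]
    by_cases h : q x <;> simp [h] <;> ring

-- over a duplicate-free list, the indicator of one value sums to its membership
theorem pvIndSum (p : Int → Bool) (x : Int) :
    ∀ ys : List Int, ys.Nodup →
      (ys.map (fun v => if p v && decide (v = x) then (1 : Int) else 0)).sum
        = if p x && decide (x ∈ ys) then 1 else 0
  | [], _ => by simp
  | y :: ys, h => by
    have hnd := (List.nodup_cons.mp h).2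
    have hmem := (List.nodup_cons.mp h).1
    rw [List.map_cons, List.sum_cons, pvIndSum p x ys hnd]
    by_cases hyx : y = x
    · subst hyx
      simp [hmem]
    · have : (x ∈ y :: ys) ↔ (x ∈ ys) := by
        constructor
        · intro hx; rcases List.mem_cons.mp hx with h | h
          · exact absurd h.symm hyx
          · exact h
        · exact fun hx => List.mem_cons_of_mem _ hx
      simp [hyx, this]

-- summing multiplicities over a duplicate-free index list counts the matching entries
theorem pvCountSum (p : Int → Bool) (ys : List Int) (hnd : ys.Nodup) :
    ∀ xs : List Int,
      (ys.map (fun v => if p v then (xs.count v : Int) else 0)).sum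
        = (xs.countP (fun e => p e && decide (e ∈ ys)) : Int)
  | [] => by simp
  | x :: xs => by
    have ih := pvCountSum p ys hnd xs
    have hsplit : ∀ v : Int,
        (if p v then ((x :: xs).count v : Int) else 0)
          = (if p v then (xs.count v : Int) else 0)
            + (if p v && decide (v = x) then (1 : Int) else 0) := by
      intro v
      by_cases hvx : v = x
      · subst hvx
        by_cases hp : p v <;> simp [hp, List.count_cons_self]
      · have hxv : x ≠ v := fun h => hvx h.symm
        by_cases hp : p v <;> simp [hp, hvx, hxv]
    rw [List.map_congr_left (fun v _ => hsplit v)]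
    rw [List.sum_map_add] at *
    rw [ih, pvIndSum p x ys hnd]
    rw [List.countP_cons]
    by_cases hq : (p x && decide (x ∈ ys)) = true <;> simp [hq]

-- the complement count of B: len(cur) minus the summed multiplicities of values
-- present in the neighbour list equals the number of entries missing from it
theorem pvMissingEq (cur prevL : List Int) :
    (cur.length : Int)
      - ((cur.foldl (fun (d : PySem.Dict Int Int) e => d.insert e (d.getD e 0 + 1)) PySem.Dict.empty).items.foldl
          (fun (s : Int) vc => if PySem.Set.contains (PySem.Set.ofList prevL) vc.1 then s + vc.2 else s) 0)
      = (cur.countP (fun e => !decide (e ∈ prevL)) : Int) := by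
  rw [PySem.Dict.foldl_insert_getD_add_one_eq_counter]
  rw [PySem.Dict.items_counter]
  rw [pvFoldIfAdd, List.map_map]
  have hcont : ∀ v : Int, PySem.Set.contains (PySem.Set.ofList prevL) v = decide (v ∈ prevL) := by
    intro v
    by_cases h : v ∈ prevL
    · simp [PySem.Set.mem_ofList, h]
    · simp [PySem.Set.mem_ofList, h]
  have hmap : (PySem.Set.ofList cur).map
        ((fun vc : Int × Int => if PySem.Set.contains (PySem.Set.ofList prevL) vc.1 then vc.2 else 0)
          ∘ fun k => (k, (cur.count k : Int)))
      = (PySem.Set.ofList cur).map (fun v => if decide (v ∈ prevL) then (cur.count v : Int) else 0) := by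
    apply List.map_congr_left
    intro v _
    simp [Function.comp]
  rw [hmap]
  rw [pvCountSum (fun v => decide (v ∈ prevL)) (PySem.Set.ofList cur) (PySem.Set.nodup_ofList cur) cur]
  have hcp : cur.countP (fun e => decide (e ∈ prevL) && decide (e ∈ PySem.Set.ofList cur))
      = cur.countP (fun e => decide (e ∈ prevL)) := by
    apply List.countP_congr
    intro e he
    have : e ∈ PySem.Set.ofList cur := (PySem.Set.mem_ofList cur e).mpr he
    simp [this]
  rw [hcp]
  have hlen : cur.countP (fun e => decide (e ∈ prevL))
      + cur.countP (fun e => !decide (e ∈ prevL)) = cur.length := by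
    have h := List.length_eq_countP_add_countP (p := fun e => decide (e ∈ prevL)) (l := cur)
    have h2 : cur.countP (fun a => decide ¬(decide (a ∈ prevL) = true))
        = cur.countP (fun e => !decide (e ∈ prevL)) := by
      apply List.countP_congr
      intro e _
      by_cases he : e ∈ prevL <;> simp [he]
    omega
  omega

-- closed forms of B's per-index contributions
def pvBL (L : List (List (List Int))) (ifr : Int × List (List Int)) : Int :=
  if ifr.1 = 0 then pvTlen ifr.2 else pvCnt2 ifr.2 (PySem.List.pyGetD L (ifr.1 - 1) [])

def pvBS (L : List (List (List Int))) (n : Int) (ifr : Int × List (List Int)) : Int :=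
  if ifr.1 = n - 1 then pvTlen ifr.2 else pvCnt2 ifr.2 (PySem.List.pyGetD L (ifr.1 + 1) [])

theorem pvStepB_eq (L : List (List (List Int))) (n : Int) :
    pvStepB L n = fun acc ifr => (acc.1 + pvBL L ifr, acc.2 + pvBS L n ifr) := by
  funext acc ifr
  unfold pvStepB pvBL pvBS pvTlen pvCnt2
  simp only [List.foldl_cons, List.foldl_nil]
  rw [pvMissingEq, pvMissingEq, pvMissingEq, pvMissingEq]
  split_ifs <;> simp [Prod.ext_iff] <;> omega

theorem pvBL_eval (L : List (List (List Int))) (k : Nat) :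
    pvBL L ((k : Int), PySem.List.pyGetD L (k : Int) []) = pvLoadT L k := by
  unfold pvBL pvLoadT
  cases k with
  | zero => simp [PySem.List.pyGetD_zero, List.getD]
  | succ m =>
    have hidx : ((m + 1 : Nat) : Int) - 1 = ((m : Nat) : Int) := by push_cast; ring
    have hne : ((m + 1 : Nat) : Int) ≠ 0 := by omega
    rw [if_neg hne, if_neg (Nat.succ_ne_zero m), hidx]
    simp only [PySem.List.pyGetD_natCast, Nat.add_sub_cancel]

theorem pvBS_eval (L : List (List (List Int))) (k : Nat) (hk : k < L.length) :
    pvBS L (L.length : Int) ((k : Int), PySem.List.pyGetD L (k : Int) []) = pvStoreT L k := by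
  unfold pvBS pvStoreT
  by_cases hk1 : k = L.length - 1
  · subst hk1
    have hc : ((L.length - 1 : Nat) : Int) = (L.length : Int) - 1 := by omega
    rw [if_pos hc, if_pos rfl]
    simp [PySem.List.pyGetD_natCast]
  · have hne : (k : Int) ≠ (L.length : Int) - 1 := by omega
    have hidx : (k : Int) + 1 = ((k + 1 : Nat) : Int) := by push_cast; ring
    rw [if_neg hne, if_neg hk1, hidx]
    simp only [PySem.List.pyGetD_natCast]

theorem pvB_char (L : List (List (List Int))) :
    gather_stats_alt L = [((List.range L.length).map (pvLoadT L)).sum,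
                          ((List.range L.length).map (pvStoreT L)).sum] := by
  rw [pvB_unfold]
  dsimp only
  rw [pvStepB_eq, pvFoldPair]
  rw [PySem.List.enumerate_eq_map_pyRange (d := [])]
  rw [List.map_map, List.map_map]
  simp only [PySem.List.len_eq]
  rw [PySem.List.pyRange_one]
  rw [List.map_map, List.map_map]
  simp only [Function.comp_def, Int.sub_zero, Int.toNat_natCast, zero_add]
  congr 1
  · exact congrArg List.sum (List.map_congr_left fun k _ => pvBL_eval L k)
  · congr 1
    exact congrArg List.sum
      (List.map_congr_left fun k hk => pvBS_eval L k (List.mem_range.mp hk))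

-- ===== VERDICT (by name: the statement is the Claim_ definition above) =====
theorem gather_stats_spec : Claim_equal_gather_stats := by
  intro L _ _
  unfold Spec_gather_stats
  rw [pvA_char, pvB_char]
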